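-- pv_equiv track=rewrite | github.com/ronanguilloux/biblecli | fix_tob_format.py | get_valid_source_verse
-- ===== SOURCE A (Python) =====
-- MARK_VERSES_COUNT = {
--     1: 45, 2: 28, 3: 35, 4: 41, 5: 43, 6: 56, 7: 37, 8: 38,
--     9: 50, 10: 52, 11: 33, 12: 44, 13: 37, 14: 72, 15: 47, 16: 20
-- }
--
-- def get_valid_source_verse(digits_str, chapter):
--     """
--     Given a string of digits following 'C.', return the longest prefix
--     that forms a valid verse number for the given chapter.
--     """
--     max_v = MARK_VERSES_COUNT.get(chapter, 60)
--
--     for i in range(len(digits_str), 0, -1):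
--         num_str = digits_str[:i]
--         try:
--             val = int(num_str)
--             if 1 <= val <= max_v:
--                 return num_str
--         except ValueError:
--             continue
--     return None
-- ===== SOURCE B (Python) =====
-- MARK_VERSES_COUNT = {
--     1: 45, 2: 28, 3: 35, 4: 41, 5: 43, 6: 56, 7: 37, 8: 38,
--     9: 50, 10: 52, 11: 33, 12: 44, 13: 37, 14: 72, 15: 47, 16: 20
-- }
--
--
-- def _verse_ok(prefix, max_v):
--     try:
--         return 1 <= int(prefix) <= max_v
--     except ValueError:
--         return False
--
--
-- def get_valid_source_verse(digits_str, chapter):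
--     """
--     Longest prefix of digits_str that is a valid verse number for chapter:
--     collect every valid prefix length going forward, answer is the last one.
--     """
--     max_v = MARK_VERSES_COUNT.get(chapter, 60)
--     valid = [i for i in range(1, len(digits_str) + 1)
--              if _verse_ok(digits_str[:i], max_v)]
--     return digits_str[:valid[-1]] if valid else None
-- ===== Notes on version B (the rewrite author's own statement) =====
-- stated objective: alternative
-- what changed: A scans prefix lengths backwards with an early return inside an explicit try/except loop; B builds the list of all valid prefix lengths with a forward filtering comprehension over a boolean helper and takes its last element.
import Mathlib
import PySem

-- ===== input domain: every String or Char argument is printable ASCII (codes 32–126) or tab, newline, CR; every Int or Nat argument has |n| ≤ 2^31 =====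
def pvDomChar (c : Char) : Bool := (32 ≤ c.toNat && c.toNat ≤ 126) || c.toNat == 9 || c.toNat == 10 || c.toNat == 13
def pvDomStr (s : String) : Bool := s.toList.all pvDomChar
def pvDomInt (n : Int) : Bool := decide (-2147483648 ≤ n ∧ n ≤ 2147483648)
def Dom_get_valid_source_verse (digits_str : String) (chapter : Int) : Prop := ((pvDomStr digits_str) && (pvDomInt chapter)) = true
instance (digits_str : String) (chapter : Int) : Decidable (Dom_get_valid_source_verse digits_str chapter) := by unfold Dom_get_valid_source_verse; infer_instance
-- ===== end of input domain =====

-- B replaces A's backward early-return scan by a forward filtering pass over all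
-- prefix lengths followed by taking the last valid one (objective: alternative).


-- module constant MARK_VERSES_COUNT (shared context of both versions)
def markVersesCount : PySem.Dict Int Int := PySem.Dict.ofList
  [(1,45),(2,28),(3,35),(4,41),(5,43),(6,56),(7,37),(8,38),
   (9,50),(10,52),(11,33),(12,44),(13,37),(14,72),(15,47),(16,20)]

-- ===== PORT A =====
-- the 'for i in range(len(digits_str), 0, -1)' loop with early return
def getValidGoA (digits_str : String) (max_v : Int) : List Int → Option String
  | [] => none
  | i :: rest =>
    let num_str := PySem.Str.slice digits_str none (some i)
    match PySem.Int.ofStr? num_str with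
    | some val => if 1 ≤ val ∧ val ≤ max_v then some num_str else getValidGoA digits_str max_v rest
    | none => getValidGoA digits_str max_v rest

def get_valid_source_verse (digits_str : String) (chapter : Int) : Option String :=
  let max_v := PySem.Dict.getD markVersesCount chapter 60
  getValidGoA digits_str max_v (PySem.List.pyRange (PySem.Str.len digits_str) 0 (-1))

-- ===== PORT B =====
def verseOk (pre : String) (max_v : Int) : Bool :=
  match PySem.Int.ofStr? pre with
  | some v => decide (1 ≤ v ∧ v ≤ max_v)
  | none => false

def get_valid_source_verse_alt (digits_str : String) (chapter : Int) : Option String :=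
  let max_v := PySem.Dict.getD markVersesCount chapter 60
  let valid := (PySem.List.pyRange 1 (PySem.Str.len digits_str + 1) 1).filter
      (fun i => verseOk (PySem.Str.slice digits_str none (some i)) max_v)
  match PySem.List.pyGet? valid (-1) with
  | some i => some (PySem.Str.slice digits_str none (some i))
  | none => none

-- ===== PRECONDITION & SPEC =====
def Spec_get_valid_source_verse (digits_str : String) (chapter : Int) (out : Option String) : Prop := out = get_valid_source_verse_alt digits_str chapter
instance (digits_str : String) (chapter : Int) (out : Option String) : Decidable (Spec_get_valid_source_verse digits_str chapter out) := by unfold Spec_get_valid_source_verse; infer_instance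

-- ===== CLAIM (what is proved, stated in full; the proofs are below) =====
def Claim_equal_get_valid_source_verse : Prop := ∀ (digits_str : String) (chapter : Int), Dom_get_valid_source_verse digits_str chapter → Spec_get_valid_source_verse digits_str chapter (get_valid_source_verse digits_str chapter)

-- ===== LEMMAS AND PROOFS =====

-- A's loop is: first i in the list passing verseOk, returned as the sliced prefix.
theorem getValidGoA_eq_head_filter (digits_str : String) (max_v : Int) (l : List Int) :
    getValidGoA digits_str max_v l =
      ((l.filter (fun i => verseOk (PySem.Str.slice digits_str none (some i)) max_v)).head?).map
        (fun i => PySem.Str.slice digits_str none (some i)) := by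
  induction l with
  | nil => rfl
  | cons i rest ih =>
    simp only [getValidGoA, List.filter_cons]
    cases h : PySem.Int.ofStr? (PySem.Str.slice digits_str none (some i)) with
    | none => simp [verseOk, h, ih]
    | some val =>
      by_cases hc : 1 ≤ val ∧ val ≤ max_v
      · simp [verseOk, h, hc]
      · simp [verseOk, h, hc, ih]

-- ===== VERDICT (by name: the statement is the Claim_ definition above) =====
theorem get_valid_source_verse_spec : Claim_equal_get_valid_source_verse := by
  intro digits_str chapter _
  unfold Spec_get_valid_source_verse get_valid_source_verse get_valid_source_verse_alt
  have hrev : PySem.List.pyRange (PySem.Str.len digits_str) 0 (-1) =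
      (PySem.List.pyRange 1 (PySem.Str.len digits_str + 1) 1).reverse := by
    simpa using PySem.List.pyRange_neg_one_eq_reverse (PySem.Str.len digits_str) 0
  simp only [hrev, getValidGoA_eq_head_filter, PySem.List.pyGet?_neg_one,
    List.filter_reverse, List.head?_reverse]
  cases ((PySem.List.pyRange 1 (PySem.Str.len digits_str + 1) 1).filter
      (fun i => verseOk (PySem.Str.slice digits_str none (some i))
        (PySem.Dict.getD markVersesCount chapter 60))).getLast? <;> rfl
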